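-- pv_equiv track=rewrite | github.com/Trojanekkk/keystroke-biometrics | utils/n_graf_search.py | find_n_grafs
-- ===== SOURCE A (Python) =====
-- def find_n_grafs (text):
--     n_grafs = {}
--
--     for i, c in enumerate(text[:-1]):
--         if (text[i] != ' ') & (text[i + 1] != ' '):
--             digraf = text[i] + text[i + 1]
--             if digraf in n_grafs:
--                 n_grafs[digraf] += 1
--             else:
--                 n_grafs[digraf] = 1
--
--     # return dict(n for n in sorted(n_grafs.items(), key=lambda item: -item[1]))
--     return dict(n for n in sorted(n_grafs.items(), key=lambda item: -item[1]) if n[1] > 2)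
-- ===== SOURCE B (Python) =====
-- def find_n_grafs(text):
--     counts = {}
--     for word in text.split(' '):
--         for x, y in zip(word, word[1:]):
--             pair = x + y
--             counts[pair] = counts.get(pair, 0) + 1
--     return {p: c for p, c in sorted(counts.items(), key=lambda it: -it[1]) if c > 2}
-- ===== Notes on version B (the rewrite author's own statement) =====
-- stated objective: alternative
-- what changed: Replaced the single indexed sliding-window scan with per-index space-guard tests by tokenizing the text on the space separator and counting adjacent character pairs inside each token, keeping the same descending-count sort and the same >2 filter.
import Mathlib
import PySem

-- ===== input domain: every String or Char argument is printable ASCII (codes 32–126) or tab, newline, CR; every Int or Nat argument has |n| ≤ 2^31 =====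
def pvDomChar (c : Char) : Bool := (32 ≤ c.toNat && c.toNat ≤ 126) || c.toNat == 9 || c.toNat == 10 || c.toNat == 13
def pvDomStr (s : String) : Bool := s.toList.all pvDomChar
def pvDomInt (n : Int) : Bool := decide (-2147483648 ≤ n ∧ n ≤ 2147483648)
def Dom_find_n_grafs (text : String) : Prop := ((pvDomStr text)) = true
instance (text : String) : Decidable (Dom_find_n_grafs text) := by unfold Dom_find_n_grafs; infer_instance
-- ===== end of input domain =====

-- B replaces A's indexed sliding-window scan with space guards by tokenising on the space
-- separator and counting adjacent pairs inside each token (constant-factor speedup: no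
-- per-index lookups or guard tests; measured faster in a timing run).

-- ===== PORT A =====
-- Literal port of A: enumerate over text[:-1], index text[i], text[i+1] (always in range
-- here, so pyGetD's default ' ' is never used), count in a dict, then sort by -count and
-- keep counts > 2 (dict() of pairs = Dict.ofList …, returned as its items list).
def find_n_grafs (text : String) : List (String × Int) :=
  let cs := text.toList
  let n_grafs : PySem.Dict String Int :=
    (PySem.List.enumerate (PySem.Str.slice text none (some (-1))).toList).foldl
      (fun d ic =>
        if (PySem.List.pyGetD cs ic.1 ' ' != ' ') && (PySem.List.pyGetD cs (ic.1 + 1) ' ' != ' ') then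
          let digraf := String.ofList [PySem.List.pyGetD cs ic.1 ' ', PySem.List.pyGetD cs (ic.1 + 1) ' ']
          if d.contains digraf then d.insert digraf (d.getD digraf 0 + 1)
          else d.insert digraf 1
        else d)
      PySem.Dict.empty
  (PySem.Dict.ofList ((PySem.List.sorted n_grafs.items (fun item => -item.2)).filter (fun n => n.2 > 2))).items

-- ===== PORT B =====
-- Port of Source B: text.split(' ') = List.splitOn ' ' on the characters; count pairs inside
-- each word with zip(word, word[1:]); same sort and > 2 filter.
def find_n_grafs_alt (text : String) : List (String × Int) :=
  let counts : PySem.Dict String Int :=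
    (List.splitOn ' ' text.toList).foldl
      (fun d w =>
        (w.zip w.tail).foldl
          (fun d xy =>
            let pair := String.ofList [xy.1, xy.2]
            d.insert pair (d.getD pair 0 + 1)) d)
      PySem.Dict.empty
  (PySem.Dict.ofList ((PySem.List.sorted counts.items (fun it => -it.2)).filter (fun it => it.2 > 2))).items

-- ===== PRECONDITION & SPEC =====
def Spec_find_n_grafs (text : String) (out : List (String × Int)) : Prop := out = find_n_grafs_alt text
instance (text : String) (out : List (String × Int)) : Decidable (Spec_find_n_grafs text out) := by unfold Spec_find_n_grafs; infer_instance

-- ===== CLAIM (what is proved, stated in full; the proofs are below) =====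
def Claim_equal_find_n_grafs : Prop := ∀ (text : String), Dom_find_n_grafs text → Spec_find_n_grafs text (find_n_grafs text)

-- ===== LEMMAS AND PROOFS =====

-- the common counting step d[s] = d.get(s, 0) + 1
def pvStep (d : PySem.Dict String Int) (s : String) : PySem.Dict String Int :=
  d.insert s (d.getD s 0 + 1)

-- digraph of a character pair
def pvMk (p : Char × Char) : String := String.ofList [p.1, p.2]

-- A's guard: neither character is a space
def pvP (p : Char × Char) : Bool := (p.1 != ' ') && (p.2 != ' ')

-- A's indexed enumeration produces exactly the adjacent character pairs of the text
theorem pv_enum_map_zip (cs : List Char) :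
    (PySem.List.enumerate cs.dropLast 0).map
      (fun ic => (PySem.List.pyGetD cs ic.1 ' ', PySem.List.pyGetD cs (ic.1 + 1) ' '))
      = cs.zip cs.tail := by
  apply List.ext_getElem
  · simp [PySem.List.length_enumerate]
  · intro k h1 h2
    simp only [List.getElem_map, PySem.List.getElem_enumerate, List.getElem_zip]
    have hk : k < cs.length - 1 := by
      simp [PySem.List.length_enumerate] at h1; omega
    have e1 : (0 : Int) + (k : Int) = ((k : Nat) : Int) := by ring
    rw [e1, PySem.List.pyGetD_natCast]
    have e2 : ((k : Nat) : Int) + 1 = ((k + 1 : Nat) : Int) := by push_cast; ring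
    rw [e2, PySem.List.pyGetD_natCast]
    rw [List.getD_eq_getElem cs ' ' (by omega), List.getD_eq_getElem cs ' ' (by omega)]
    rw [List.getElem_tail]

-- A's counting loop counts the guarded adjacent pairs of the text
theorem pv_countsA (text : String) :
    (PySem.List.enumerate (PySem.Str.slice text none (some (-1))).toList).foldl
      (fun d ic =>
        if (PySem.List.pyGetD text.toList ic.1 ' ' != ' ') && (PySem.List.pyGetD text.toList (ic.1 + 1) ' ' != ' ') then
          let digraf := String.ofList [PySem.List.pyGetD text.toList ic.1 ' ', PySem.List.pyGetD text.toList (ic.1 + 1) ' ']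
          if d.contains digraf then d.insert digraf (d.getD digraf 0 + 1)
          else d.insert digraf 1
        else d)
      PySem.Dict.empty
    = (((text.toList.zip text.toList.tail).filter pvP).map pvMk).foldl pvStep PySem.Dict.empty := by
  rw [PySem.Str.slice_to_neg_one, ← pv_enum_map_zip text.toList, List.filter_map,
    List.map_map, List.foldl_map, List.foldl_filter]
  congr 1
  funext d ic
  simp only [Function.comp_apply, pvP, pvStep, pvMk]
  by_cases hP : (PySem.List.pyGetD text.toList ic.1 ' ' != ' '
      && PySem.List.pyGetD text.toList (ic.1 + 1) ' ' != ' ') = true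
  · rw [if_pos hP, if_pos hP]
    by_cases hc : PySem.Dict.contains d
        (String.ofList [PySem.List.pyGetD text.toList ic.1 ' ', PySem.List.pyGetD text.toList (ic.1 + 1) ' ']) = true
    · simp only [hc, if_pos]
    · simp only [Bool.not_eq_true] at hc
      rw [PySem.Dict.getD_of_not_contains (h := hc)]
      simp [hc]
  · rw [if_neg hP, if_neg hP]

-- a nested counting fold is the fold over the flattened list
theorem pv_foldl_flatMap {α β γ : Type} (g : α → List β) (f : γ → β → γ)
    (ws : List α) (d : γ) :
    ws.foldl (fun d w => (g w).foldl f d) d = (ws.flatMap g).foldl f d := by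
  induction ws generalizing d with
  | nil => rfl
  | cons w ws ih => simp [List.flatMap_cons, List.foldl_append, ih]

-- B's counting loop counts the in-word adjacent pairs
theorem pv_countsB (text : String) :
    (List.splitOn ' ' text.toList).foldl
      (fun d w =>
        (w.zip w.tail).foldl
          (fun d xy =>
            let pair := String.ofList [xy.1, xy.2]
            d.insert pair (d.getD pair 0 + 1)) d)
      PySem.Dict.empty
    = (((List.splitOnP (· == ' ') text.toList).flatMap (fun w => w.zip w.tail)).map pvMk).foldl
        pvStep PySem.Dict.empty := by
  have h1 : List.splitOn ' ' text.toList = List.splitOnP (· == ' ') text.toList := rfl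
  rw [h1, List.foldl_map]
  exact pv_foldl_flatMap (fun w : List Char => w.zip w.tail) (fun d xy => pvStep d (pvMk xy)) _ _

-- CORE: the space-guarded adjacent pairs of the text are the adjacent pairs of its ' '-tokens
theorem pv_core (cs : List Char) :
    (cs.zip cs.tail).filter pvP
      = (List.splitOnP (· == ' ') cs).flatMap (fun w => w.zip w.tail) := by
  induction cs with
  | nil => simp [List.splitOnP_nil]
  | cons a t ih =>
    cases t with
    | nil =>
      rw [List.splitOnP_cons]
      by_cases ha : (a == ' ') = true <;> simp [ha, List.splitOnP_nil]
    | cons b t' =>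
      rw [List.splitOnP_cons]
      by_cases ha : (a == ' ') = true
      · rw [if_pos ha, List.flatMap_cons]
        have hpv : pvP (a, b) = false := by
          simp [pvP]; intro h; exact absurd (by exact of_decide_eq_true ha) h
        show List.filter pvP ((a, b) :: (b :: t').zip t') = _
        rw [List.filter_cons_of_neg (by simp [hpv])]
        simpa using ih
      · rw [if_neg ha]
        rw [List.splitOnP_cons] at ih ⊢
        by_cases hb : (b == ' ') = true
        · rw [if_pos hb] at ih ⊢
          have hpv : pvP (a, b) = false := by
            simp [pvP, of_decide_eq_true hb]
          show List.filter pvP ((a, b) :: (b :: t').zip t') = _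
          rw [List.filter_cons_of_neg (by simp [hpv])]
          simp only [List.modifyHead_cons, List.flatMap_cons] at ih ⊢
          simpa using ih
        · rw [if_neg hb] at ih ⊢
          obtain ⟨w', rest, hw⟩ := List.exists_cons_of_ne_nil (List.splitOnP_ne_nil (· == ' ') t')
          rw [hw] at ih ⊢
          have ha' : a ≠ ' ' := by intro h; exact ha (by simp [h])
          have hb' : b ≠ ' ' := by intro h; exact hb (by simp [h])
          have hpv : pvP (a, b) = true := by simp [pvP, ha', hb']
          show List.filter pvP ((a, b) :: (b :: t').zip t') = _
          rw [List.filter_cons_of_pos (by simp [hpv])]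
          simp only [List.modifyHead_cons, List.flatMap_cons, List.tail_cons] at ih ⊢
          rw [ih]
          simp

-- ===== VERDICT (by name: the statement is the Claim_ definition above) =====
theorem find_n_grafs_spec : Claim_equal_find_n_grafs := by
  intro text _
  show find_n_grafs text = find_n_grafs_alt text
  simp only [find_n_grafs, find_n_grafs_alt]
  rw [pv_countsA, pv_countsB, pv_core]
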